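-- pv_equiv track=rewrite | github.com/woini2727/bioinformatica | Advanced_alignment/Hirschberg_Needdleman.py | find_max_pos
-- ===== SOURCE A (Python) =====
-- def find_max_pos(col,m):
--     maxi = -100000
--     pos = 0
--     for i in range(m):
--         if col[i] >= maxi:
--             maxi = col[i]
--             pos = i
--     return (maxi, pos)
-- ===== SOURCE B (Python) =====
-- def find_max_pos(col, m):
--     k = m if m > 0 else 0
--     prefix = col[:k]
--     maxi = max([-100000] + prefix)
--     pos = 0
--     for i in range(len(prefix)):
--         if prefix[i] == maxi:
--             pos = i
--     return (maxi, pos)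
-- ===== Notes on version B (the rewrite author's own statement) =====
-- stated objective: alternative
-- what changed: Replaces A's single fused scan that updates (maxi, pos) together with a two-pass shape: first compute the maximum of the prefix folded with the -100000 sentinel, then a second pass records the last index whose value equals that maximum.
import Mathlib
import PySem

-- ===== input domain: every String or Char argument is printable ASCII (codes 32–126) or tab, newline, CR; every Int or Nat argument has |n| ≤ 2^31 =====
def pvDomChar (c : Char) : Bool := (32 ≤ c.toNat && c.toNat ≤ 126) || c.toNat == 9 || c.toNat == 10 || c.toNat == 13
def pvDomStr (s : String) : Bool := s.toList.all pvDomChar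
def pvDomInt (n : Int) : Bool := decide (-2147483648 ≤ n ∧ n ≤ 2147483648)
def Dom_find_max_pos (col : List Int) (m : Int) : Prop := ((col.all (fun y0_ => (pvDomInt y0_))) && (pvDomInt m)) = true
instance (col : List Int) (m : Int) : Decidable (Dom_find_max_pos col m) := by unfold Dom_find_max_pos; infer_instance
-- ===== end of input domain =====

-- B splits A's fused max-and-argmax scan into two passes (max first, then last index equal to it); alternative decomposition, same cost.

-- ===== PORT A =====
def find_max_pos (col : List Int) (m : Int) : Int × Int :=
  (PySem.List.pyRange 0 m).foldl
    (fun (st : Int × Int) i =>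
      match PySem.List.pyGet? col i with
      | some v => if v ≥ st.1 then (v, i) else st
      | none => st)   -- none = IndexError in Python; excluded by Pre_find_max_pos
    (-100000, 0)

-- ===== PORT B =====
def find_max_pos_alt (col : List Int) (m : Int) : Int × Int :=
  let k : Int := if m > 0 then m else 0
  let pref := PySem.List.slice col none (some k)          -- col[:k]
  let maxi := pref.foldl max (-100000)                    -- max([-100000] + pref)
  let pos := (PySem.List.pyRange 0 (pref.length : Int)).foldl
    (fun (q : Int) i => if PySem.List.pyGetD pref i 0 = maxi then i else q) 0
    -- pref[i]: i always in range here, so pyGetD is exact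
  (maxi, pos)

-- ===== PRECONDITION & SPEC =====
-- A indexes col[i] for every i in range(m): Pre_ excludes m > len(col), where A raises IndexError.
def Pre_find_max_pos (col : List Int) (m : Int) : Prop := m ≤ (col.length : Int)
instance (col : List Int) (m : Int) : Decidable (Pre_find_max_pos col m) := by unfold Pre_find_max_pos; infer_instance
def pvWitness_find_max_pos : List Int × Int := ([3, 7, 7, 1], 4)
def Spec_find_max_pos (col : List Int) (m : Int) (out : Int × Int) : Prop := out = find_max_pos_alt col m
instance (col : List Int) (m : Int) (out : Int × Int) : Decidable (Spec_find_max_pos col m out) := by unfold Spec_find_max_pos; infer_instance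

-- ===== CLAIM (what is proved, stated in full; the proofs are below) =====
def Claim_equal_find_max_pos : Prop := ∀ (col : List Int) (m : Int), Dom_find_max_pos col m → Pre_find_max_pos col m → Spec_find_max_pos col m (find_max_pos col m)

-- ===== LEMMAS AND PROOFS =====

-- range(0, m) as a list of casted naturals, for every m (empty when m ≤ 0)
lemma pyRange_zero_toNat (m : Int) :
    PySem.List.pyRange 0 m = List.map (fun k : Nat => (k : Int)) (List.range m.toNat) := by
  by_cases h : 0 < m
  · have hm : ((m.toNat : Int)) = m := by omega
    have h2 := PySem.List.pyRange_zero_natCast m.toNat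
    rw [hm] at h2
    exact h2
  · have h0 : m.toNat = 0 := by omega
    unfold PySem.List.pyRange
    simp only [if_pos (by norm_num : (0:Int) < 1), h0]
    simp [h]

-- A's fused scan over indices 0..n-1 equals (max of the pref, last index of that max)
lemma fused_split (xs : List Int) :
    ∀ (n : Nat), n ≤ xs.length → ∀ (a p : Int),
    (List.range n).foldl
        (fun (st : Int × Int) i => if xs.getD i 0 ≥ st.1 then (xs.getD i 0, (i : Int)) else st) (a, p)
    = ((xs.take n).foldl max a,
       (List.range n).foldl
        (fun (q : Int) i => if xs.getD i 0 = (xs.take n).foldl max a then (i : Int) else q) p) := by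
  intro n
  induction n with
  | zero => simp
  | succ n ih =>
    intro hn a p
    have hlt : n < xs.length := by omega
    have htake : xs.take (n + 1) = xs.take n ++ [xs.getD n 0] := by
      rw [List.take_add_one]
      simp [List.getD, List.getElem?_eq_getElem hlt]
    rw [List.range_succ, List.foldl_append, List.foldl_append, htake, List.foldl_append,
        ih (by omega) a p]
    simp only [List.foldl_cons, List.foldl_nil]
    by_cases hc : xs.getD n 0 ≥ (xs.take n).foldl max a
    · rw [if_pos hc]
      simp only [max_eq_right hc]
      simp
    · have hlt' : xs.getD n 0 < (xs.take n).foldl max a := lt_of_not_ge hc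
      rw [if_neg hc]
      simp only [max_eq_left (le_of_lt hlt')]
      rw [if_neg (ne_of_lt hlt')]

-- ===== VERDICT (by name: the statement is the Claim_ definition above) =====
theorem find_max_pos_spec : Claim_equal_find_max_pos := by
  intro col m _hdom hpre
  unfold Spec_find_max_pos
  set n : Nat := m.toNat with hn
  have hnlen : n ≤ col.length := by
    unfold Pre_find_max_pos at hpre; omega
  -- A reduces to the index fold over range n with getD
  have hA : find_max_pos col m
      = (List.range n).foldl
          (fun (st : Int × Int) i => if col.getD i 0 ≥ st.1 then (col.getD i 0, (i : Int)) else st)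
          (-100000, 0) := by
    unfold find_max_pos
    rw [pyRange_zero_toNat, List.foldl_map]
    apply PySem.List.foldl_congr_mem
    intro acc i hi
    have hilt : i < col.length := by
      have := List.mem_range.mp hi; omega
    rw [PySem.List.pyGet?_natCast, List.getElem?_eq_getElem hilt]
    simp [List.getD, List.getElem?_eq_getElem hilt]
  -- B's pref is col.take n
  have hpref : PySem.List.slice col none (some (if m > 0 then m else 0)) = col.take n := by
    by_cases hm : m > 0
    · have : (if m > 0 then m else 0) = ((n : Nat) : Int) := by
        rw [if_pos hm]; omega
      rw [this, PySem.List.slice_to_natCast]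
    · have h0 : n = 0 := by omega
      have : (if m > 0 then m else 0) = ((0 : Nat) : Int) := by rw [if_neg hm]; rfl
      rw [this, PySem.List.slice_to_natCast, h0]
  have hlen : (col.take n).length = n := by
    rw [List.length_take]; omega
  have hB : find_max_pos_alt col m
      = ((col.take n).foldl max (-100000),
         (List.range n).foldl
          (fun (q : Int) i => if col.getD i 0 = (col.take n).foldl max (-100000) then (i : Int) else q)
          0) := by
    simp only [find_max_pos_alt, hpref, hlen]
    rw [pyRange_zero_toNat]
    have hcast : ((n : Int)).toNat = n := by omega
    rw [hcast, List.foldl_map]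
    congr 1
    apply PySem.List.foldl_congr_mem
    intro acc i hi
    have hilt : i < n := List.mem_range.mp hi
    rw [PySem.List.pyGetD_natCast]
    have : (col.take n).getD i 0 = col.getD i 0 := by
      have h1 : i < (col.take n).length := by omega
      have h2 : i < col.length := by omega
      simp [List.getD, List.getElem?_eq_getElem h1, List.getElem?_eq_getElem h2,
            List.getElem_take]
    rw [this]
  rw [hA, hB, fused_split col n hnlen (-100000) 0]
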